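-- pv_equiv track=rewrite | github.com/libsemigroups/HPCombi | etc/bench_plot.py | determine_subplot_layout
-- ===== SOURCE A (Python) =====
-- from math import isqrt
--
-- def determine_subplot_layout(nr_plots: int) -> tuple[int, int]:
--     """Determine the number of rows and columns from number of plots."""
--     nr_plot_rows = isqrt(nr_plots)
--     nr_plot_cols = nr_plot_rows
--     if nr_plot_rows * nr_plot_cols < nr_plots:
--         nr_plot_cols += 1
--     while nr_plot_rows * nr_plot_cols < nr_plots:
--         nr_plot_rows += 1
--     return nr_plot_rows, nr_plot_cols
-- ===== SOURCE B (Python) =====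
-- from math import isqrt
--
-- def determine_subplot_layout(nr_plots: int) -> tuple[int, int]:
--     """Determine the number of rows and columns from number of plots."""
--     r = isqrt(nr_plots)
--     cols = r if r * r == nr_plots else r + 1
--     rows = 0 if cols == 0 else -(-nr_plots // cols)
--     return rows, cols
-- ===== Notes on version B (the rewrite author's own statement) =====
-- stated objective: simpler
-- what changed: Replaces the if-then-while incremental search with a closed-form computation: cols = ceil(sqrt(n)) via isqrt, rows = ceiling division -(-n // cols) (0 when cols is 0).
import Mathlib
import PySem

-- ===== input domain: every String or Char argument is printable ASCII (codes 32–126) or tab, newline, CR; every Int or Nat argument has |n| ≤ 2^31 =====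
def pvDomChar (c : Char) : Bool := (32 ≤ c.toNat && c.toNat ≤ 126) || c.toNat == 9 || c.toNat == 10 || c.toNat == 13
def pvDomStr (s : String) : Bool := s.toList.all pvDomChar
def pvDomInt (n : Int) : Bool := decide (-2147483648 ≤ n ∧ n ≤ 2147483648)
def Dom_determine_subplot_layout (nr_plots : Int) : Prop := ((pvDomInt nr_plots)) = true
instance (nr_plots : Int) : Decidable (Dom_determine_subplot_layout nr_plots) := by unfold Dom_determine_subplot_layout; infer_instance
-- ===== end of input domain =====

-- B replaces A's if-then-while incremental search by a closed-form ceiling computation (objective: simpler).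

-- ===== PORT A =====
-- the 'while nr_plot_rows * nr_plot_cols < nr_plots: nr_plot_rows += 1' loop;
-- the extra '0 < cols' conjunct only makes the recursion total (on inputs A reaches,
-- cols > 0 whenever the loop condition holds, so it never changes the result)
def pvWhileRows (nr_plots rows cols : Int) : Int :=
  if h : rows * cols < nr_plots ∧ 0 < cols then pvWhileRows nr_plots (rows + 1) cols else rows
termination_by (nr_plots - rows * cols).toNat
decreasing_by
  have h2 := h.2
  have : (rows + 1) * cols = rows * cols + cols := by ring
  omega

def determine_subplot_layout (nr_plots : Int) : Int × Int :=
  let nr_plot_rows : Int := (Nat.sqrt nr_plots.toNat : Int)  -- isqrt(nr_plots), exact for nr_plots ≥ 0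
  let nr_plot_cols : Int :=
    if nr_plot_rows * nr_plot_rows < nr_plots then nr_plot_rows + 1 else nr_plot_rows
  (pvWhileRows nr_plots nr_plot_rows nr_plot_cols, nr_plot_cols)

-- ===== PORT B =====
def determine_subplot_layout_alt (nr_plots : Int) : Int × Int :=
  let r : Int := (Nat.sqrt nr_plots.toNat : Int)  -- isqrt(nr_plots), exact for nr_plots ≥ 0
  let cols : Int := if r * r = nr_plots then r else r + 1
  let rows : Int := if cols = 0 then 0 else -(PySem.Int.floordiv (-nr_plots) cols)
  (rows, cols)

-- ===== PRECONDITION & SPEC =====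
-- Pre_ excludes negative nr_plots, on which A raises ValueError from isqrt (B raises there too).
def Pre_determine_subplot_layout (nr_plots : Int) : Prop := 0 ≤ nr_plots
instance (nr_plots : Int) : Decidable (Pre_determine_subplot_layout nr_plots) := by
  unfold Pre_determine_subplot_layout; infer_instance
def pvWitness_determine_subplot_layout : Int := (7)

def Spec_determine_subplot_layout (nr_plots : Int) (out : Int × Int) : Prop := out = determine_subplot_layout_alt nr_plots
instance (nr_plots : Int) (out : Int × Int) : Decidable (Spec_determine_subplot_layout nr_plots out) := by unfold Spec_determine_subplot_layout; infer_instance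

-- ===== CLAIM (what is proved, stated in full; the proofs are below) =====
def Claim_equal_determine_subplot_layout : Prop := ∀ (nr_plots : Int), Dom_determine_subplot_layout nr_plots → Pre_determine_subplot_layout nr_plots → Spec_determine_subplot_layout nr_plots (determine_subplot_layout nr_plots)

-- ===== LEMMAS AND PROOFS =====

lemma pvWhileRows_stop (n rows cols : Int) (h : ¬ (rows * cols < n ∧ 0 < cols)) :
    pvWhileRows n rows cols = rows := by
  rw [pvWhileRows]; simp [h]

lemma pvWhileRows_step (n rows cols : Int) (h : rows * cols < n ∧ 0 < cols) :
    pvWhileRows n rows cols = pvWhileRows n (rows + 1) cols := by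
  rw [pvWhileRows]; simp [h]

-- isqrt bounds over Int, for 0 ≤ n
lemma int_sqrt_bounds (n : Int) (hn : 0 ≤ n) :
    ((Nat.sqrt n.toNat : Int)) * ((Nat.sqrt n.toNat : Int)) ≤ n ∧
    n < ((Nat.sqrt n.toNat : Int) + 1) * ((Nat.sqrt n.toNat : Int) + 1) := by
  have h1 : Nat.sqrt n.toNat * Nat.sqrt n.toNat ≤ n.toNat := by
    have := Nat.sqrt_le' n.toNat; simpa [pow_two] using this
  have h2 : n.toNat < (Nat.sqrt n.toNat + 1) * (Nat.sqrt n.toNat + 1) := by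
    have := Nat.lt_succ_sqrt' n.toNat; simpa [Nat.succ_eq_add_one, pow_two] using this
  have hn' : (n.toNat : Int) = n := Int.toNat_of_nonneg hn
  constructor
  · calc ((Nat.sqrt n.toNat : Int)) * ((Nat.sqrt n.toNat : Int))
        = ((Nat.sqrt n.toNat * Nat.sqrt n.toNat : Nat) : Int) := by push_cast; ring
      _ ≤ (n.toNat : Int) := by exact_mod_cast h1
      _ = n := hn'
  · calc n = (n.toNat : Int) := hn'.symm
      _ < (((Nat.sqrt n.toNat + 1) * (Nat.sqrt n.toNat + 1) : Nat) : Int) := by exact_mod_cast h2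
      _ = ((Nat.sqrt n.toNat : Int) + 1) * ((Nat.sqrt n.toNat : Int) + 1) := by push_cast; ring

-- ===== VERDICT (by name: the statement is the Claim_ definition above) =====
theorem determine_subplot_layout_spec : Claim_equal_determine_subplot_layout := by
  intro n _ hn
  unfold Spec_determine_subplot_layout determine_subplot_layout determine_subplot_layout_alt
  dsimp only
  set r : Int := (Nat.sqrt n.toNat : Int) with hr
  obtain ⟨hlo, hhi⟩ := int_sqrt_bounds n hn
  rw [← hr] at hlo hhi
  have hr0 : 0 ≤ r := by positivity
  by_cases heq : r * r = n
  · -- n is a perfect square: both return (r, r)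
    rw [if_neg (by omega : ¬ r * r < n), if_pos heq,
        pvWhileRows_stop n r r (fun h => absurd h.1 (by omega))]
    by_cases hz : r = 0
    · simp [hz]
    · have hrpos : 0 < r := lt_of_le_of_ne hr0 (Ne.symm hz)
      have hd : -(PySem.Int.floordiv (-n) r) = r :=
        (PySem.Int.neg_floordiv_neg_eq_iff_of_pos hrpos).mpr ⟨by nlinarith, le_of_eq heq.symm⟩
      rw [if_neg hz, hd]
  · -- r*r < n : cols = r + 1 on both sides
    have hlt : r * r < n := lt_of_le_of_ne hlo heq
    have hrpos : 0 < r + 1 := by omega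
    rw [if_pos hlt, if_neg heq, if_neg (by omega : ¬ (r + 1 = 0))]
    by_cases hmid : r * (r + 1) < n
    · -- rows becomes r + 1
      rw [pvWhileRows_step n r (r + 1) ⟨hmid, hrpos⟩,
          pvWhileRows_stop n (r + 1) (r + 1) (fun h => absurd h.1 (by omega))]
      have hd : -(PySem.Int.floordiv (-n) (r + 1)) = r + 1 :=
        (PySem.Int.neg_floordiv_neg_eq_iff_of_pos hrpos).mpr ⟨by nlinarith, by nlinarith⟩
      rw [hd]
    · -- rows stays r
      have hd : -(PySem.Int.floordiv (-n) (r + 1)) = r :=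
        (PySem.Int.neg_floordiv_neg_eq_iff_of_pos hrpos).mpr ⟨by nlinarith, by nlinarith⟩
      rw [pvWhileRows_stop n r (r + 1) (fun h => absurd h.1 hmid), hd]
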